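-- pv_equiv track=rewrite | github.com/dmitrykravchenko2018/mit-6001x | midterm_exam.py | largest_odd_times
-- ===== SOURCE A (Python) =====
-- def largest_odd_times(L):
--     """ Assumes L is a non-empty list of ints
--         Returns the largest element of L that occurs an odd number
--         of times in L. If no such element exists, returns None
--     """
--     tmp_set = set(L)
--     while len(tmp_set) > 0:
--     	res = max(tmp_set)
--     	if (L.count(res) % 2) != 0:
--     		return res
--     	else:
--     		tmp_set.remove(res)
-- ===== SOURCE B (Python) =====
-- def largest_odd_times(L):
--     """ Assumes L is a non-empty list of ints
--         Returns the largest element of L that occurs an odd number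
--         of times in L. If no such element exists, returns None
--     """
--     s = sorted(L, reverse=True)
--     if not s:
--         return None
--     cur, cnt = s[0], 1
--     for x in s[1:]:
--         if x == cur:
--             cnt += 1
--         else:
--             if cnt % 2 == 1:
--                 return cur
--             cur, cnt = x, 1
--     if cnt % 2 == 1:
--         return cur
--     return None
-- ===== Notes on version B (the rewrite author's own statement) =====
-- stated objective: alternative
-- what changed: Replaces the repeated max-of-set + L.count loop with one descending sort followed by a single run-length scan that returns at the first odd-length run.
import Mathlib
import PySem

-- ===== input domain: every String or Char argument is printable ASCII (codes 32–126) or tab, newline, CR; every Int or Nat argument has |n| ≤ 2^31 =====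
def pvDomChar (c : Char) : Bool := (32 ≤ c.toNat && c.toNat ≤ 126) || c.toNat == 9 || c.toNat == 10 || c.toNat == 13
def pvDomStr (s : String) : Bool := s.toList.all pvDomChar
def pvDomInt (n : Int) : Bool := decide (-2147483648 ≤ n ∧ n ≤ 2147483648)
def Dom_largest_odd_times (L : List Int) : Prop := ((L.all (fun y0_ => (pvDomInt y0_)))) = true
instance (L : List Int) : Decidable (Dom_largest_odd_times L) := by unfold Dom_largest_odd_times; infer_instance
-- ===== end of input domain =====

-- B replaces A's repeated max-of-set + L.count scan with one descending sort and a single run-length pass (alternative algorithm, same measured cost).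


-- ===== PORT A =====
-- the 'while len(tmp_set) > 0' loop: res = max(tmp_set); odd count → return, else remove
def lotLoopA (L : List Int) (s : PySem.Set Int) : Option Int :=
  match hm : PySem.List.max? s (fun x => x) with
  | none => none
  | some res =>
    if (L.count res) % 2 ≠ 0 then some res
    else
      match hr : PySem.Set.remove? s res with
      | none => none   -- unreachable: res ∈ s, so Python's set.remove cannot raise here
      | some s' => lotLoopA L s'
termination_by s.length
decreasing_by
  have hmem : res ∈ s := PySem.List.max?_mem hm
  rw [PySem.Set.remove?_of_mem hmem] at hr
  cases hr
  simp only [PySem.Set.discard]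
  exact List.length_filter_lt_length_iff_exists.mpr ⟨res, hmem, by simp⟩

def largest_odd_times (L : List Int) : Option Int :=
  lotLoopA L (PySem.Set.ofList L)

-- ===== PORT B =====
-- run-length scan over the descending-sorted list
def lotScanB (L : List Int) (cur : Int) (cnt : Nat) : List Int → Option Int
  | [] => if cnt % 2 = 1 then some cur else none
  | x :: xs =>
    if x = cur then lotScanB L cur (cnt + 1) xs
    else if cnt % 2 = 1 then some cur
    else lotScanB L x 1 xs

def largest_odd_times_alt (L : List Int) : Option Int :=
  match PySem.List.sorted L (fun x => x) true with
  | [] => none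
  | x :: xs => lotScanB L x 1 xs

-- ===== PRECONDITION & SPEC =====
def Spec_largest_odd_times (L : List Int) (out : Option Int) : Prop := out = largest_odd_times_alt L
instance (L : List Int) (out : Option Int) : Decidable (Spec_largest_odd_times L out) := by unfold Spec_largest_odd_times; infer_instance

-- ===== CLAIM (what is proved, stated in full; the proofs are below) =====
def Claim_equal_largest_odd_times : Prop := ∀ (L : List Int), Dom_largest_odd_times L → Spec_largest_odd_times L (largest_odd_times L)

-- ===== LEMMAS AND PROOFS =====

-- Python's "L.count(v) % 2 != 0" as a Bool predicate
def lotOdd (L : List Int) (v : Int) : Bool := decide (L.count v % 2 ≠ 0)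

-- dropping all occurrences of a value the predicate rejects does not change find?
theorem find?_filter_ne (p : Int → Bool) (c : Int) (hp : p c = false) :
    ∀ t : List Int, (t.filter (fun y => y ≠ c)).find? p = t.find? p
  | [] => rfl
  | x :: xs => by
    by_cases hx : x = c
    · subst hx
      rw [List.filter_cons_of_neg (by simp), find?_filter_ne p x hp xs,
        List.find?_cons_of_neg (by simp [hp])]
    · rw [List.filter_cons_of_pos (by simp [hx])]
      cases h : p x
      · rw [List.find?_cons_of_neg (by simp [h]), List.find?_cons_of_neg (by simp [h]),
          find?_filter_ne p c hp xs]
      · rw [List.find?_cons_of_pos h, List.find?_cons_of_pos h]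

theorem find?_eq_head?_filter (p : Int → Bool) (t : List Int) :
    t.find? p = (t.filter p).head? := by
  induction t with
  | nil => rfl
  | cons x xs ih =>
    cases h : p x
    · rw [List.find?_cons_of_neg (by simp [h]), List.filter_cons_of_neg (by simp [h]), ih]
    · rw [List.find?_cons_of_pos h, List.filter_cons_of_pos h]; rfl

-- two descending lists with the same members have the same head
theorem head?_eq_of_desc_same_mem (t₁ t₂ : List Int)
    (h₁ : t₁.Pairwise (fun a b => b ≤ a)) (h₂ : t₂.Pairwise (fun a b => b ≤ a))
    (hmem : ∀ x, x ∈ t₁ ↔ x ∈ t₂) : t₁.head? = t₂.head? := by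
  match t₁, t₂ with
  | [], [] => rfl
  | [], b :: u => exact absurd ((hmem b).mpr List.mem_cons_self) (by simp)
  | a :: t, [] => exact absurd ((hmem a).mp List.mem_cons_self) (by simp)
  | a :: t, b :: u =>
    have hab : a ≤ b := by
      rcases List.mem_cons.mp ((hmem a).mp List.mem_cons_self) with h | h
      · exact le_of_eq h
      · exact List.rel_of_pairwise_cons h₂ h
    have hba : b ≤ a := by
      rcases List.mem_cons.mp ((hmem b).mpr List.mem_cons_self) with h | h
      · exact le_of_eq h
      · exact List.rel_of_pairwise_cons h₁ h
    simp [le_antisymm hab hba]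

-- invariant of B's scan on a descending tail
theorem lotScanB_spec (L : List Int) (t : List Int) (cur : Int) (cnt : Nat)
    (hdesc : t.Pairwise (fun a b => b ≤ a))
    (hle : ∀ y ∈ t, y ≤ cur)
    (hcur : (cnt + t.count cur) % 2 = L.count cur % 2)
    (hoth : ∀ y ∈ t, y ≠ cur → t.count y = L.count y) :
    lotScanB L cur cnt t =
      if L.count cur % 2 = 1 then some cur
      else (t.filter (fun y => y ≠ cur)).find? (lotOdd L) := by
  induction t generalizing cur cnt with
  | nil =>
    simp only [List.count_nil, Nat.add_zero] at hcur
    simp only [lotScanB, hcur, List.filter_nil, List.find?_nil]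
  | cons x xs ih =>
    rcases List.pairwise_cons.mp hdesc with ⟨hxle, hxs⟩
    by_cases hx : x = cur
    · subst hx
      have hc : (cnt + 1 + xs.count x) % 2 = L.count x % 2 := by
        simp only [List.count_cons_self] at hcur; omega
      have hrec := ih (cur := x) (cnt := cnt + 1) hxs hxle hc
        (fun y hy hne => by
          have := hoth y (List.mem_cons_of_mem _ hy) hne
          rwa [List.count_cons_of_ne (Ne.symm hne)] at this)
      rw [show lotScanB L x cnt (x :: xs) = lotScanB L x (cnt + 1) xs by simp [lotScanB],
        List.filter_cons_of_neg (by simp), hrec]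
    · have hxlt : x < cur := lt_of_le_of_ne (hle x List.mem_cons_self) hx
      have hcurnot : cur ∉ xs := fun hmem => absurd (hxle cur hmem) (not_le.mpr hxlt)
      have hcur' : cnt % 2 = L.count cur % 2 := by
        rw [List.count_cons_of_ne hx, List.count_eq_zero.mpr hcurnot] at hcur
        simpa using hcur
      rw [show lotScanB L cur cnt (x :: xs)
          = if cnt % 2 = 1 then some cur else lotScanB L x 1 xs by simp [lotScanB, hx]]
      by_cases hodd : L.count cur % 2 = 1
      · rw [if_pos (hcur'.trans hodd), if_pos hodd]
      · rw [if_neg (fun h => hodd (hcur' ▸ h)), if_neg hodd]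
        have hcx : (1 + xs.count x) % 2 = L.count x % 2 := by
          have := hoth x List.mem_cons_self hx
          rw [List.count_cons_self] at this; omega
        have hrec := ih (cur := x) (cnt := 1) hxs (fun y hy => hxle y hy) hcx
          (fun y hy hne => by
            have hyle : y ≤ x := hxle y hy
            have hyne : y ≠ cur := fun h => absurd (h ▸ lt_of_le_of_lt hyle hxlt) (lt_irrefl _)
            have := hoth y (List.mem_cons_of_mem _ hy) hyne
            rwa [List.count_cons_of_ne (Ne.symm hne)] at this)
        rw [hrec]
        have hxsf : xs.filter (fun y => y ≠ cur) = xs :=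
          List.filter_eq_self.mpr (fun y hy => by
            simp only [ne_eq, decide_eq_true_eq]
            exact fun h => hcurnot (h ▸ hy))
        rw [List.filter_cons_of_pos (by simp [hx]), hxsf]
        by_cases hox : L.count x % 2 = 1
        · have hpx : lotOdd L x = true := by simp only [lotOdd, decide_eq_true_eq]; omega
          rw [if_pos hox, List.find?_cons_of_pos hpx]
        · have hpx : lotOdd L x = false := by
            simp only [lotOdd, decide_eq_false_iff_not]; omega
          rw [if_neg hox, List.find?_cons_of_neg (by simp [hpx]),
            find?_filter_ne (lotOdd L) x hpx xs]

-- B computes find? of the odd-count predicate over the descending-sorted list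
theorem altB_eq_find (L : List Int) :
    largest_odd_times_alt L = (PySem.List.sorted L (fun x => x) true).find? (lotOdd L) := by
  unfold largest_odd_times_alt
  cases hs : PySem.List.sorted L (fun x => x) true with
  | nil => rfl
  | cons x xs =>
    show lotScanB L x 1 xs = List.find? (lotOdd L) (x :: xs)
    have hperm := PySem.List.sorted_perm L (fun x => x) true
    rw [hs] at hperm
    have hdescAll := PySem.List.sorted_pairwise_rev L (fun x => x)
    rw [hs] at hdescAll
    rcases List.pairwise_cons.mp hdescAll with ⟨hxle, hxs⟩
    have hcount : ∀ v, (x :: xs).count v = L.count v := fun v => hperm.count_eq v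
    have hmain := lotScanB_spec L xs x 1 hxs hxle
      (by have := hcount x; rw [List.count_cons_self] at this; omega)
      (fun y hy hne => by
        have := hcount y; rwa [List.count_cons_of_ne (Ne.symm hne)] at this)
    rw [hmain]
    by_cases hodd : L.count x % 2 = 1
    · have hpx : lotOdd L x = true := by simp only [lotOdd, decide_eq_true_eq]; omega
      rw [if_pos hodd, List.find?_cons_of_pos hpx]
    · have hpx : lotOdd L x = false := by simp only [lotOdd, decide_eq_false_iff_not]; omega
      rw [if_neg hodd, List.find?_cons_of_neg (by simp [hpx]),
        find?_filter_ne (lotOdd L) x hpx xs]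

-- A's loop computes find? of the odd-count predicate over the descending-sorted set
theorem lotLoopA_spec (L : List Int) (s : PySem.Set Int) (hnd : s.Nodup) :
    lotLoopA L s = (PySem.List.sorted s (fun x => x) true).find? (lotOdd L) := by
  induction s using (measure (List.length (α := Int))).wf.induction with
  | _ s ih =>
  rw [lotLoopA.eq_def]
  split
  next hm =>
    rw [(PySem.List.max?_eq_none_iff s _).mp hm]; rfl
  next res hm =>
    have hmem : res ∈ s := PySem.List.max?_mem hm
    have hmax : ∀ y ∈ s, y ≤ res := fun y hy => PySem.List.max?_isMax hm y hy
    have hdisc : PySem.Set.discard s res = s.erase res :=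
      (List.Nodup.erase_eq_filter hnd res).symm
    have hnd' : (s.erase res).Nodup := hnd.erase res
    have hperm : (res :: s.erase res).Perm s := (List.perm_cons_erase hmem).symm
    have hlt : ∀ y ∈ s.erase res, y < res := fun y hy =>
      lt_of_le_of_ne (hmax y (List.mem_of_mem_erase hy))
        (by
          have hy' : y ∈ s.filter (fun x => x != res) :=
            (List.Nodup.erase_eq_filter hnd res) ▸ hy
          simpa using (List.mem_filter.mp hy').2)
    have hsorted : PySem.List.sorted s (fun x => x) true
        = res :: PySem.List.sorted (s.erase res) (fun x => x) true := by
      apply PySem.List.sorted_rev_eq_of_perm_of_pairwise_gt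
      · exact (((PySem.List.sorted_perm (s.erase res) (fun x => x) true).cons res).trans hperm)
      · apply List.pairwise_cons.mpr
        refine ⟨fun y hy => hlt y ((PySem.List.mem_sorted _ _ _ _).mp hy), ?_⟩
        have hge := PySem.List.sorted_pairwise_rev (s.erase res) (fun x => x)
        have hne : (PySem.List.sorted (s.erase res) (fun x => x) true).Pairwise (· ≠ ·) :=
          ((PySem.List.sorted_perm (s.erase res) (fun x => x) true).nodup_iff.mpr hnd')
        exact (hge.and hne).imp (fun h => lt_of_le_of_ne h.1 (Ne.symm h.2))
    rw [hsorted]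
    by_cases hodd : L.count res % 2 ≠ 0
    · rw [if_pos hodd, List.find?_cons_of_pos (by simp [lotOdd, hodd])]
    · rw [if_neg hodd, List.find?_cons_of_neg (by simp [lotOdd]; omega)]
      split
      next hr => rw [PySem.Set.remove?_of_mem hmem] at hr; cases hr
      next s' hr =>
        rw [PySem.Set.remove?_of_mem hmem, hdisc] at hr
        cases hr
        exact ih (s.erase res)
          (show (s.erase res).length < s.length by
            rw [List.length_erase_of_mem hmem]
            exact Nat.sub_lt (List.length_pos_of_mem hmem) Nat.one_pos) hnd'

-- ===== VERDICT (by name: the statement is the Claim_ definition above) =====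
theorem largest_odd_times_spec : Claim_equal_largest_odd_times := by
  intro L _
  unfold Spec_largest_odd_times
  rw [largest_odd_times, lotLoopA_spec L _ (PySem.Set.nodup_ofList L), altB_eq_find,
    find?_eq_head?_filter, find?_eq_head?_filter]
  apply head?_eq_of_desc_same_mem
  · exact (PySem.List.sorted_pairwise_rev _ _).filter _
  · exact (PySem.List.sorted_pairwise_rev _ _).filter _
  · intro x
    simp [List.mem_filter, PySem.List.mem_sorted, PySem.Set.mem_ofList]
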